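-- pv_equiv track=rewrite | github.com/vasahni/leetcode | dsa/sliding_windows.py | flip_single_zero
-- ===== SOURCE A (Python) =====
-- def flip_single_zero(s: str) -> int:
--     """
--     You are given a binary string s (a string containing only "0" and "1").
--     You may choose up to one "0" and flip it to a "1". What is the length of
--     the longest substring achievable that contains only "1"?
--
--     Trick: what is the longest substring that contains at most one 0
--     """
--     left = curr = ans = 0
--     for right in range(len(s)):
--         if s[right] == "0":
--             curr += 1
--         while curr > 1:
--             if s[left] == "0":
--                 curr -= 1
--             left += 1
--         ans = max(ans, right - left + 1)
--     return ans
-- ===== SOURCE B (Python) =====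
-- def flip_single_zero(s: str) -> int:
--     last_zero = second_last_zero = -1
--     ans = 0
--     for right in range(len(s)):
--         if s[right] == "0":
--             second_last_zero = last_zero
--             last_zero = right
--         ans = max(ans, right - second_last_zero)
--     return ans
-- ===== Notes on version B (the rewrite author's own statement) =====
-- stated objective: simpler
-- what changed: Replaces the two-pointer sliding window (inner while-loop shrinking the window and a zero counter) by a single pass that only remembers the indices of the last and second-last zero: the best window ending at right is right - second_last_zero.
import Mathlib
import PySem

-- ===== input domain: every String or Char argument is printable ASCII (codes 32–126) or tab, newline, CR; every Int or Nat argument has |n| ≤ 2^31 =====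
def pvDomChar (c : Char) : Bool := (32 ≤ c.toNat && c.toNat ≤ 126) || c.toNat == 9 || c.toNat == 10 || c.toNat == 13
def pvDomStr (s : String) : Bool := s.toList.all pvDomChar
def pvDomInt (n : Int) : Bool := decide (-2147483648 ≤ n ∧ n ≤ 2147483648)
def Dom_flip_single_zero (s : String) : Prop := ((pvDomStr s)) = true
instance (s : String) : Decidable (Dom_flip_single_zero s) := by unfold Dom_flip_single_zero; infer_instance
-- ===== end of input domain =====

-- B replaces A's shrink-the-window two-pointer loop by tracking the last and
-- second-last zero indices (objective: simpler; same O(n) cost).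

-- ===== PORT A =====
-- the inner `while curr > 1` loop; fuel = s length bounds its iterations
def pvWhileA (cs : List Char) : Nat → Nat × Nat → Nat × Nat
  | 0, st => st
  | fuel + 1, (left, curr) =>
    if curr > 1 then
      pvWhileA cs fuel (left + 1, if cs.getD left ' ' == '0' then curr - 1 else curr)
    else (left, curr)

def pvStepA (cs : List Char) (st : Nat × Nat × Int) (right : Nat) : Nat × Nat × Int :=
  let curr1 := if cs.getD right ' ' == '0' then st.2.1 + 1 else st.2.1
  let lc := pvWhileA cs cs.length (st.1, curr1)
  (lc.1, lc.2, max st.2.2 ((right : Int) - (lc.1 : Int) + 1))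

def flip_single_zero (s : String) : Int :=
  ((List.range s.toList.length).foldl (pvStepA s.toList) (0, 0, 0)).2.2

-- ===== PORT B =====
def pvStepB (cs : List Char) (st : Int × Int × Int) (right : Nat) : Int × Int × Int :=
  let lz := if cs.getD right ' ' == '0' then ((right : Int), st.1) else (st.1, st.2.1)
  (lz.1, lz.2, max st.2.2 ((right : Int) - lz.2))

def flip_single_zero_alt (s : String) : Int :=
  ((List.range s.toList.length).foldl (pvStepB s.toList) (-1, -1, 0)).2.2

-- ===== PRECONDITION & SPEC =====
def Spec_flip_single_zero (s : String) (out : Int) : Prop := out = flip_single_zero_alt s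
instance (s : String) (out : Int) : Decidable (Spec_flip_single_zero s out) := by unfold Spec_flip_single_zero; infer_instance

-- ===== CLAIM (what is proved, stated in full; the proofs are below) =====
def Claim_equal_flip_single_zero : Prop := ∀ (s : String), Dom_flip_single_zero s → Spec_flip_single_zero s (flip_single_zero s)

-- ===== LEMMAS AND PROOFS =====

-- `Z cs j` : position j of cs holds a '0'
def pvZ (cs : List Char) (j : Nat) : Prop := (cs.getD j ' ' == '0') = true

-- the joint invariant after processing the first k indices
def pvInv (cs : List Char) (k : Nat) (a : Nat × Nat × Int) (b : Int × Int × Int) : Prop :=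
  a.2.2 = b.2.2 ∧
  (a.1 : Int) = b.2.1 + 1 ∧
  (-1 : Int) ≤ b.2.1 ∧ b.2.1 ≤ b.1 ∧ b.1 < (k : Int) ∧
  (a.2.1 = if b.2.1 < b.1 then 1 else 0) ∧
  (b.2.1 < b.1 → 0 ≤ b.1 ∧ pvZ cs b.1.toNat) ∧
  (b.2.1 = b.1 → b.1 = -1) ∧
  (∀ j : Nat, b.2.1 < (j : Int) → j < k → (j : Int) ≠ b.1 → ¬ pvZ cs j)

theorem pvWhileA_done (cs : List Char) (fuel left curr : Nat) (h : ¬ curr > 1) :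
    pvWhileA cs fuel (left, curr) = (left, curr) := by
  cases fuel with
  | zero => rfl
  | succ n => simp [pvWhileA, h]

-- running the while loop with curr = 2 from left up to the first zero p
theorem pvWhileA_run (cs : List Char) (fuel left p : Nat)
    (hlp : left ≤ p) (hf : p - left < fuel) (hz : pvZ cs p)
    (hno : ∀ j, left ≤ j → j < p → ¬ pvZ cs j) :
    pvWhileA cs fuel (left, 2) = (p + 1, 1) := by
  induction fuel generalizing left with
  | zero => omega
  | succ n ih =>
    by_cases hl : left = p
    · subst hl
      have hz' : cs[left]?.getD ' ' = '0' := by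
        simpa [pvZ, List.getD_eq_getElem?_getD] using hz
      rw [show pvWhileA cs (n + 1) (left, 2) = pvWhileA cs n (left + 1, 1) by
            simp [pvWhileA, hz']]
      exact pvWhileA_done cs n (left + 1) 1 (by omega)
    · have hnz : ¬ pvZ cs left := hno left le_rfl (by omega)
      have hnz' : ¬ cs[left]?.getD ' ' = '0' := by
        simpa [pvZ, List.getD_eq_getElem?_getD] using hnz
      rw [show pvWhileA cs (n + 1) (left, 2) = pvWhileA cs n (left + 1, 2) by
            simp [pvWhileA, hnz']]
      exact ih (left + 1) (by omega) (by omega)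
        (fun j hj1 hj2 => hno j (by omega) hj2)

-- one step preserves the invariant
theorem pvStep_inv (cs : List Char) (k : Nat) (hk : k < cs.length)
    (a : Nat × Nat × Int) (b : Int × Int × Int) (h : pvInv cs k a b) :
    pvInv cs (k + 1) (pvStepA cs a k) (pvStepB cs b k) := by
  obtain ⟨hans, hleft, hsl0, hslle, hlt, hcurr, hlastz, heq, hno⟩ := h
  obtain ⟨left, curr, ansA⟩ := a
  obtain ⟨last, slast, ansB⟩ := b
  simp only at hans hleft hsl0 hslle hlt hcurr hlastz heq hno
  by_cases hz : (cs.getD k ' ' == '0') = true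
  · -- current char is a zero
    by_cases hsl : slast < last
    · -- second zero in the window: while loop fires
      have hlz : 0 ≤ last ∧ pvZ cs last.toNat := hlastz hsl
      have hln : (last.toNat : Int) = last := Int.toNat_of_nonneg hlz.1
      have hlw : pvWhileA cs cs.length (left, curr + 1) = (last.toNat + 1, 1) := by
        rw [hcurr, if_pos hsl]
        apply pvWhileA_run cs cs.length left last.toNat (by omega) (by omega) hlz.2
        intro j hj1 hj2
        exact hno j (by omega) (by omega) (by omega)
      refine ⟨?_, ?_, ?_, ?_, ?_, ?_, ?_, ?_, ?_⟩ <;>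
        simp only [pvStepA, pvStepB, hz, if_pos, hlw]
      · simp only [hans]; congr 1; omega
      · push_cast; omega
      · omega
      · omega
      · push_cast; omega
      · simp [hlt]
      · intro _; exact ⟨by omega, by simpa [pvZ, Int.toNat_natCast] using hz⟩
      · omega
      · intro j hj1 hj2 hj3
        by_cases hjk : j = k
        · omega
        · exact hno j (by omega) (by omega) (by omega)
    · -- first zero ever (last = slast = -1): curr becomes 1, no while
      have hm1 : last = -1 := heq (by omega)
      have hc0 : curr = 0 := by rw [hcurr, if_neg hsl]
      have hlw : pvWhileA cs cs.length (left, curr + 1) = (left, 1) := by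
        rw [hc0]; exact pvWhileA_done cs _ _ _ (by omega)
      refine ⟨?_, ?_, ?_, ?_, ?_, ?_, ?_, ?_, ?_⟩ <;>
        simp only [pvStepA, pvStepB, hz, if_pos, hlw]
      · simp only [hans]; congr 1; omega
      · omega
      · omega
      · omega
      · push_cast; omega
      · simp [show last < (k : Int) by omega]
      · intro _; exact ⟨by omega, by simpa [pvZ, Int.toNat_natCast] using hz⟩
      · omega
      · intro j hj1 hj2 hj3
        by_cases hjk : j = k
        · omega
        · exact hno j (by omega) (by omega) (by omega)
  · -- not a zero: nothing moves
    have hc1 : curr ≤ 1 := by rw [hcurr]; split <;> omega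
    have hlw : pvWhileA cs cs.length (left, curr) = (left, curr) :=
      pvWhileA_done cs _ _ _ (by omega)
    rw [Bool.not_eq_true] at hz
    refine ⟨?_, ?_, ?_, ?_, ?_, ?_, ?_, ?_, ?_⟩ <;>
      simp only [pvStepA, pvStepB, hz, Bool.false_eq_true, if_false, hlw]
    · simp only [hans]; congr 1; omega
    · exact hleft
    · exact hsl0
    · exact hslle
    · push_cast; omega
    · exact hcurr
    · exact hlastz
    · exact heq
    · intro j hj1 hj2 hj3
      by_cases hjk : j = k
      · subst hjk
        simp only [pvZ, List.getD_eq_getElem?_getD] at hz ⊢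
        simpa using hz
      · exact hno j hj1 (by omega) hj3

theorem pvInv_fold (cs : List Char) (k : Nat) (hk : k ≤ cs.length) :
    pvInv cs k ((List.range k).foldl (pvStepA cs) (0, 0, 0))
      ((List.range k).foldl (pvStepB cs) (-1, -1, 0)) := by
  induction k with
  | zero =>
    simp only [List.range_zero, List.foldl_nil]
    exact ⟨rfl, by decide, by decide, by decide, by decide, by decide,
      fun h => absurd h (by decide), fun _ => rfl, fun j _ hj2 _ => absurd hj2 (by omega)⟩
  | succ n ih =>
    rw [List.range_succ, List.foldl_append, List.foldl_append]
    simp only [List.foldl_cons, List.foldl_nil]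
    exact pvStep_inv cs n (by omega) _ _ (ih (by omega))

-- ===== VERDICT (by name: the statement is the Claim_ definition above) =====
theorem flip_single_zero_spec : Claim_equal_flip_single_zero := by
  intro s _
  unfold Spec_flip_single_zero flip_single_zero flip_single_zero_alt
  exact (pvInv_fold s.toList s.toList.length le_rfl).1
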